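-- pv_equiv track=rewrite | github.com/mpenderbare/advent-of-code-2024 | python/day_15.py | try_move_part_1
-- ===== SOURCE A (Python) =====
-- from typing import TypeAlias
--
-- Map: TypeAlias = list[list[str]]
--
-- Point: TypeAlias = tuple[int, int]
--
-- DIRECTION_FROM_MOVE: dict[str, Point] = {
--     ">": (1, 0),
--     "<": (-1, 0),
--     "^": (0, -1),
--     "v": (0, 1),
-- }
--
-- def try_move_part_1(map: Map, position: Point, move: str) -> bool:
--     x, y = position
--     obj = map[y][x]
--     if obj == "#":  # wall
--         return False
--     elif obj == ".":  # empty
--         return True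
--     else:  # robot @ or box O
--         dx, dy = DIRECTION_FROM_MOVE[move]
--         if success := try_move_part_1(map=map, position=(x + dx, y + dy), move=move):
--             map[y + dy][x + dx] = obj
--             map[y][x] = "."
--         return success
-- ===== SOURCE B (Python) =====
-- DIRECTION_FROM_MOVE = {
--     ">": (1, 0),
--     "<": (-1, 0),
--     "^": (0, -1),
--     "v": (0, 1),
-- }
--
-- def try_move_part_1(map, position, move):
--     x, y = position
--     obj = map[y][x]
--     if obj == "#":  # wall
--         return False
--     if obj == ".":  # empty
--         return True
--     dx, dy = DIRECTION_FROM_MOVE[move]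
--     # walk forward collecting the chain of pushable cells
--     chain = [(x, y)]
--     cx, cy = x, y
--     while True:
--         cx += dx
--         cy += dy
--         cell = map[cy][cx]
--         if cell == "#":
--             return False
--         if cell == ".":
--             break
--         chain.append((cx, cy))
--     # shift every cell one step, farthest first
--     for px, py in reversed(chain):
--         map[py + dy][px + dx] = map[py][px]
--     map[y][x] = "."
--     return True
-- ===== Notes on version B (the rewrite author's own statement) =====
-- stated objective: alternative
-- what changed: A's self-recursion (push the neighbour, then copy on unwind) is replaced by an iterative forward walk that collects the chain of pushable cells and, on success, shifts them farthest-first; same reads, same writes, same return value.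
import Mathlib
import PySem

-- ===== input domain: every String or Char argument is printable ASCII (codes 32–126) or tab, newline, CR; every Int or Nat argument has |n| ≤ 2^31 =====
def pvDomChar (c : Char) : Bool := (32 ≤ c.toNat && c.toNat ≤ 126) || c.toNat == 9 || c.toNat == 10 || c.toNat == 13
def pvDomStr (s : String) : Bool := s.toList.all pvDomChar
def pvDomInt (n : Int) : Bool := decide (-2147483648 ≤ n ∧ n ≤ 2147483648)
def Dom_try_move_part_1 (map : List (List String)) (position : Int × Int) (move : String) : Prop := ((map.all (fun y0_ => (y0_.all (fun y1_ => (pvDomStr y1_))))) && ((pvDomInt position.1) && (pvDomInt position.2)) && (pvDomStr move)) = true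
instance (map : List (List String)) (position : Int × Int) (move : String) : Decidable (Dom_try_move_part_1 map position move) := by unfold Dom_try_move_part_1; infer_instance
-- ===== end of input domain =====

-- B replaces A's recursion by an iterative walk that collects the chain of pushable cells and
-- then shifts them farthest-first; both Pythons also mutate `map` in place identically on Pre_
-- inputs — the equivalence proved here is about the RETURN value.

-- shared context: the module constant DIRECTION_FROM_MOVE and the cell read map[y][x]
def pvDirs : PySem.Dict String (Int × Int) :=
  PySem.Dict.ofList [(">", (1, 0)), ("<", (-1, 0)), ("^", (0, -1)), ("v", (0, 1))]

def pvCell (map : List (List String)) (x y : Int) : Option String :=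
  match PySem.List.pyGet? map y with
  | none => none
  | some row => PySem.List.pyGet? row x

-- fuel bound: on any input where the Python returns, the push chain is shorter than this
def pvFuel (map : List (List String)) : Nat :=
  2 * (map.length + (map.map List.length).sum) + 4

-- ===== PORT A =====  (A's direct recursion; the in-place writes do not affect the returned Bool)
def pvTryA (map : List (List String)) (move : String) : Nat → Int → Int → Bool
  | 0, _, _ => false
  | fuel + 1, x, y =>
    match pvCell map x y with
    | none => false                       -- IndexError in Python: outside Pre_
    | some obj =>
      if obj == "#" then false
      else if obj == "." then true
      else
        match pvDirs.get? move with
        | none => false                   -- KeyError in Python: outside Pre_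
        | some (dx, dy) => pvTryA map move fuel (x + dx) (y + dy)

def try_move_part_1 (map : List (List String)) (position : Int × Int) (move : String) : Bool :=
  pvTryA map move (pvFuel map + 1) position.1 position.2

-- ===== PORT B =====  (Source B: iterative forward walk collecting the chain; the chain drives only
-- the in-place shift, which does not affect the returned Bool)
def pvWalkB (map : List (List String)) (dx dy : Int) :
    Nat → Int → Int → List (Int × Int) → Bool
  | 0, _, _, _ => false
  | fuel + 1, cx, cy, chain =>
    let nx := cx + dx
    let ny := cy + dy
    match pvCell map nx ny with
    | none => false                       -- IndexError in Python: outside Pre_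
    | some cell =>
      if cell == "#" then false
      else if cell == "." then true      -- break: shift `chain` farthest-first, return True
      else pvWalkB map dx dy fuel nx ny ((nx, ny) :: chain)

def try_move_part_1_alt (map : List (List String)) (position : Int × Int) (move : String) : Bool :=
  match pvCell map position.1 position.2 with
  | none => false
  | some obj =>
    if obj == "#" then false
    else if obj == "." then true
    else
      match pvDirs.get? move with
      | none => false
      | some (dx, dy) =>
        pvWalkB map dx dy (pvFuel map) position.1 position.2 [(position.1, position.2)]

-- ===== PRECONDITION & SPEC =====
def pvBlocked (o : Option String) : Bool :=
  match o with | some c => c == "#" || c == "." | none => false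
def pvChainCell (o : Option String) : Bool :=
  match o with | some c => !(c == "#") && !(c == ".") | none => false

-- Pre_: exactly the inputs on which the Python returns (no IndexError/KeyError): the start cell
-- exists and either is terminal ('#'/'.') or the move is a known direction and the ray from the
-- position reaches a terminal cell through existing pushable cells.
def Pre_try_move_part_1 (map : List (List String)) (position : Int × Int) (move : String) : Prop :=
  (match pvCell map position.1 position.2 with
   | none => false
   | some obj =>
     if obj == "#" || obj == "." then true
     else
       match pvDirs.get? move with
       | none => false
       | some (dx, dy) =>
         (List.range' 1 (pvFuel map)).any (fun k =>
           pvBlocked (pvCell map (position.1 + k * dx) (position.2 + k * dy)) &&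
           (List.range' 1 (pvFuel map)).all (fun j =>
             decide (k ≤ j) ||
             pvChainCell (pvCell map (position.1 + j * dx) (position.2 + j * dy))))) = true
instance (map : List (List String)) (position : Int × Int) (move : String) : Decidable (Pre_try_move_part_1 map position move) := by unfold Pre_try_move_part_1; infer_instance

def pvWitness_try_move_part_1 : List (List String) × (Int × Int) × String :=
  ([["@", "O", "."]], (0, 0), ">")

def Spec_try_move_part_1 (map : List (List String)) (position : Int × Int) (move : String) (out : Bool) : Prop := out = try_move_part_1_alt map position move
instance (map : List (List String)) (position : Int × Int) (move : String) (out : Bool) : Decidable (Spec_try_move_part_1 map position move out) := by unfold Spec_try_move_part_1; infer_instance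

-- ===== CLAIM (what is proved, stated in full; the proofs are below) =====
def Claim_equal_try_move_part_1 : Prop := ∀ (map : List (List String)) (position : Int × Int) (move : String), Dom_try_move_part_1 map position move → Pre_try_move_part_1 map position move → Spec_try_move_part_1 map position move (try_move_part_1 map position move)

-- ===== LEMMAS AND PROOFS =====

-- B's walk from (x, y) computes exactly A's recursion started one step ahead, step for step.
theorem pvWalkB_eq_pvTryA (map : List (List String)) (move : String) (dx dy : Int)
    (hd : pvDirs.get? move = some (dx, dy)) :
    ∀ (fuel : Nat) (x y : Int) (chain : List (Int × Int)),
      pvWalkB map dx dy fuel x y chain = pvTryA map move fuel (x + dx) (y + dy) := by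
  intro fuel
  induction fuel with
  | zero => intro x y chain; rfl
  | succ n ih =>
    intro x y chain
    simp only [pvWalkB, pvTryA, hd]
    cases pvCell map (x + dx) (y + dy) with
    | none => rfl
    | some cell =>
      by_cases h1 : cell = "#" <;> by_cases h2 : cell = "." <;>
        simp [h1, h2, ih]

-- ===== VERDICT (by name: the statement is the Claim_ definition above) =====
theorem try_move_part_1_spec : Claim_equal_try_move_part_1 := by
  intro map position move _ _
  unfold Spec_try_move_part_1 try_move_part_1 try_move_part_1_alt
  simp only [pvTryA]
  cases pvCell map position.1 position.2 with
  | none => rfl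
  | some obj =>
    by_cases h1 : obj = "#" <;> by_cases h2 : obj = "." <;> simp [h1, h2]
    cases hd : pvDirs.get? move with
    | none => rfl
    | some d =>
      obtain ⟨dx, dy⟩ := d
      dsimp only
      rw [pvWalkB_eq_pvTryA map move dx dy hd]
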